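-- pv_equiv track=rewrite | github.com/zhangtingyu11/python_contest_template | src/basic/array_of_difference.py | calculate_diff_dim2
-- ===== SOURCE A (Python) =====
-- from typing import List
--
-- def calculate_diff_dim2(grid: List[List[int]])->List[List[int]]:
--     """计算二维差分数组
--         diff[i][j] = grid[i][j] - grid[i-1][j] - grid[i][j-1] + grid[i-1][j-1]
--
--     Args:
--         grid (List[List[int]]): 输入的m*n数据
--
--     Returns:
--         List[List[int]]: 生成的m*n的二维差分数组
--     """
--     m, n = len(grid), len(grid[0])
--     diff = [[0] * n for _ in range(m)]
--     for i in range(m):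
--         for j in range(n):
--             if(i==0 and j==0):
--                 diff[i][j] = grid[i][j]
--             elif(i>0 and j==0):
--                 diff[i][j] = grid[i][j]-grid[i-1][j]
--             elif(i==0 and j>0):
--                 diff[i][j] = grid[i][j]-grid[i][j-1]
--             else:
--                 diff[i][j] = grid[i][j] - grid[i-1][j] - grid[i][j-1] + grid[i-1][j-1]
--     return diff
-- ===== SOURCE B (Python) =====
-- from typing import List
--
-- def calculate_diff_dim2(grid: List[List[int]]) -> List[List[int]]:
--     # Two staged 1D passes: a horizontal difference of each row, then a
--     # vertical difference between consecutive rows, each done by zipping a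
--     # zero-shifted copy against the list (no index arithmetic, no branches).
--     n = len(grid[0])
--
--     def d1(xs):  # 1D difference: xs minus xs shifted right with a leading 0
--         return [b - a for a, b in zip([0] + xs, xs)]
--
--     h = [d1(row[:n]) for row in grid]
--     return [h[0]] + [[c - p for p, c in zip(prev, cur)]
--                      for prev, cur in zip(h, h[1:])]
-- ===== Notes on version B (the rewrite author's own statement) =====
-- stated objective: alternative
-- what changed: Replaces A's single pass with four boundary branches by a separable two-stage computation: first a 1D horizontal difference of each row (zipping a zero-prepended shifted copy against the row), then a 1D vertical difference between consecutive difference-rows via zip, with no index arithmetic or branches.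
import Mathlib
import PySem

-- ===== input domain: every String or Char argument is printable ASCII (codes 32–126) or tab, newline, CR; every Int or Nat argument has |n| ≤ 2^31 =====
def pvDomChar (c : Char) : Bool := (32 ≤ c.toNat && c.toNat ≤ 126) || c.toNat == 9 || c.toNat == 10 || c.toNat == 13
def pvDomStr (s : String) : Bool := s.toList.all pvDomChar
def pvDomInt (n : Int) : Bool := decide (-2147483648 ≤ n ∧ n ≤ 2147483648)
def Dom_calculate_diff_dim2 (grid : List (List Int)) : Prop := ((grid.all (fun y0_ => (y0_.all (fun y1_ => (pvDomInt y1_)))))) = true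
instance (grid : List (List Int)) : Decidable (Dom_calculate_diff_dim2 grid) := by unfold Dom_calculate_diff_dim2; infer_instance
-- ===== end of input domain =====

-- B replaces A's one-pass four-branch scan by two staged 1D difference passes
-- (horizontal per row, then vertical between consecutive rows, via zips of a
-- shifted copy). Objective: alternative decomposition, same asymptotic cost.
-- ===== PORT A =====
-- grid[i][j] for indices A's loop proves in range; Pre_ excludes the raising inputs
def aCell (grid : List (List Int)) (i j : Int) : Int :=
  (PySem.List.pyGet? ((PySem.List.pyGet? grid i).getD []) j).getD 0

def calculate_diff_dim2 (grid : List (List Int)) : List (List Int) :=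
  let m := grid.length
  let n := ((PySem.List.pyGet? grid 0).getD []).length
  (List.range m).map (fun (i0 : Nat) => (List.range n).map (fun (j0 : Nat) =>
    if (i0 : Int) = 0 ∧ (j0 : Int) = 0 then aCell grid i0 j0
    else if (i0 : Int) > 0 ∧ (j0 : Int) = 0 then aCell grid i0 j0 - aCell grid ((i0 : Int)-1) j0
    else if (i0 : Int) = 0 ∧ (j0 : Int) > 0 then aCell grid i0 j0 - aCell grid i0 ((j0 : Int)-1)
    else aCell grid i0 j0 - aCell grid ((i0 : Int)-1) j0 - aCell grid i0 ((j0 : Int)-1) + aCell grid ((i0 : Int)-1) ((j0 : Int)-1)))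

-- ===== PORT B =====
-- Source B's d1: 1D difference, the row zipped against its zero-prepended shift
def d1 (xs : List Int) : List Int :=
  (List.zip ((0:Int) :: xs) xs).map (fun p => p.2 - p.1)

def calculate_diff_dim2_alt (grid : List (List Int)) : List (List Int) :=
  let n := ((PySem.List.pyGet? grid 0).getD []).length
  let h := grid.map (fun row => d1 (List.take n row))
  ((PySem.List.pyGet? h 0).getD []) ::
    (List.zip h (h.drop 1)).map (fun pc => (List.zip pc.1 pc.2).map (fun p => p.2 - p.1))

-- ===== PRECONDITION & SPEC =====
-- exactly the inputs where Python A returns: a nonempty grid whose every row has at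
-- least len(grid[0]) entries (otherwise grid[0] or grid[i][j] raises IndexError)
def Pre_calculate_diff_dim2 (grid : List (List Int)) : Prop :=
  grid ≠ [] ∧ ∀ row ∈ grid, (grid.headD []).length ≤ row.length
instance (grid : List (List Int)) : Decidable (Pre_calculate_diff_dim2 grid) := by unfold Pre_calculate_diff_dim2; infer_instance
def pvWitness_calculate_diff_dim2 : List (List Int) := [[1, 2], [3, 4]]

def Spec_calculate_diff_dim2 (grid : List (List Int)) (out : List (List Int)) : Prop := out = calculate_diff_dim2_alt grid
instance (grid : List (List Int)) (out : List (List Int)) : Decidable (Spec_calculate_diff_dim2 grid out) := by unfold Spec_calculate_diff_dim2; infer_instance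

-- ===== CLAIM (what is proved, stated in full; the proofs are below) =====
def Claim_equal_calculate_diff_dim2 : Prop := ∀ (grid : List (List Int)), Dom_calculate_diff_dim2 grid → Pre_calculate_diff_dim2 grid → Spec_calculate_diff_dim2 grid (calculate_diff_dim2 grid)

-- ===== LEMMAS AND PROOFS =====
-- the common elementwise value both programs compute, and a map normal form
def Gg (grid : List (List Int)) (i j : Nat) : Int := (grid.getD i []).getD j 0

def hval (grid : List (List Int)) (i j : Nat) : Int :=
  Gg grid i j - (if j = 0 then 0 else Gg grid i (j-1))

def mapform (grid : List (List Int)) : List (List Int) :=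
  (List.range grid.length).map (fun i =>
    (List.range ((PySem.List.pyGet? grid 0).getD []).length).map (fun j =>
      hval grid i j - (if i = 0 then 0 else hval grid (i-1) j)))

theorem aCell_cast (grid : List (List Int)) (i j : Nat) :
    aCell grid (i : Int) (j : Int) = Gg grid i j := by
  simp [aCell, Gg, List.getD]

theorem d1_length (xs : List Int) : (d1 xs).length = xs.length := by
  simp [d1]

theorem d1_getElem (xs : List Int) (j : Nat) (h : j < (d1 xs).length) :
    (d1 xs)[j] = xs.getD j 0 - (if j = 0 then 0 else xs.getD (j-1) 0) := by
  have hj : j < xs.length := by simpa [d1_length] using h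
  cases j with
  | zero => simp [d1, List.getElem_zip, List.getD_eq_getElem?_getD, List.getElem?_eq_getElem hj]
  | succ k =>
      have hk : k < xs.length := by omega
      simp [d1, List.getElem_zip, List.getD_eq_getElem?_getD,
        List.getElem?_eq_getElem hj, List.getElem?_eq_getElem hk]

theorem d1_take (xs : List Int) (n : Nat) (hn : n ≤ xs.length) :
    d1 (xs.take n) =
      (List.range n).map (fun j => xs.getD j 0 - (if j = 0 then 0 else xs.getD (j-1) 0)) := by
  apply List.ext_getElem
  · simp [d1_length]; omega
  · intro j h1 h2
    have hjn : j < n := by simpa using h2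
    rw [d1_getElem]
    simp only [List.getElem_map, List.getElem_range]
    have ht : ∀ k, k < n → (xs.take n).getD k 0 = xs.getD k 0 := by
      intro k hk
      rw [List.getD_eq_getElem _ _ (by simp; omega), List.getD_eq_getElem _ _ (by omega),
        List.getElem_take]
    rw [ht j hjn]
    by_cases hj0 : j = 0
    · simp [hj0]
    · rw [if_neg hj0, if_neg hj0, ht (j-1) (by omega)]

theorem zip_tail_map (l : List (List Int)) (g : List Int × List Int → List Int) :
    (List.zip l (l.drop 1)).map g =
      (List.range (l.length - 1)).map (fun k => g (l.getD k [], l.getD (k+1) [])) := by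
  apply List.ext_getElem
  · simp
  · intro k h1 h2
    have hk : k + 1 < l.length := by
      simp only [List.length_map, List.length_zip, List.length_drop] at h1; omega
    simp only [List.getElem_map, List.getElem_zip, List.getElem_drop, List.getElem_range]
    rw [List.getD_eq_getElem _ _ (Nat.lt_of_succ_lt hk), List.getD_eq_getElem _ _ hk]
    congr 2
    simp [Nat.add_comm]

theorem A_eq_mapform (grid : List (List Int)) :
    calculate_diff_dim2 grid = mapform grid := by
  unfold calculate_diff_dim2 mapform
  refine List.map_congr_left fun i hi => List.map_congr_left fun j hj => ?_
  by_cases hi0 : i = 0 <;> by_cases hj0 : j = 0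
  · subst hi0; subst hj0
    rw [if_pos ⟨by simp, by simp⟩, aCell_cast]
    simp [hval]
  · subst hi0
    rw [if_neg (by simp [hj0]), if_neg (by simp), if_pos ⟨by simp, by positivity⟩]
    have ej : ((j : Int) - 1) = ((j - 1 : Nat) : Int) := by omega
    rw [ej, aCell_cast, aCell_cast]
    simp [hval, hj0]
  · subst hj0
    rw [if_neg (by simp [hi0]), if_pos ⟨by positivity, by simp⟩]
    have ei : ((i : Int) - 1) = ((i - 1 : Nat) : Int) := by omega
    rw [ei, aCell_cast, aCell_cast]
    simp [hval, hi0]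
  · rw [if_neg (by simp [hi0]), if_neg (by simp [hj0]), if_neg (by simp [hi0])]
    have ei : ((i : Int) - 1) = ((i - 1 : Nat) : Int) := by omega
    have ej : ((j : Int) - 1) = ((j - 1 : Nat) : Int) := by omega
    rw [ei, ej, aCell_cast, aCell_cast, aCell_cast, aCell_cast]
    simp [hval, hi0, hj0]
    ring

theorem B_eq_mapform (grid : List (List Int)) (hpre : Pre_calculate_diff_dim2 grid) :
    calculate_diff_dim2_alt grid = mapform grid := by
  obtain ⟨hne, hrows⟩ := hpre
  obtain ⟨g0, gs, rfl⟩ := List.exists_cons_of_ne_nil hne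
  have hlen : ∀ row ∈ g0 :: gs, g0.length ≤ row.length := by simpa using hrows
  have hm : ∀ k, k < gs.length + 1 → g0.length ≤ ((g0 :: gs).getD k []).length := by
    intro k hk
    refine hlen _ ?_
    rw [List.getD_eq_getElem _ _ (by simpa using hk)]
    exact List.getElem_mem _
  have hh : ∀ k, k < gs.length + 1 →
      (d1 (List.take g0.length g0) :: List.map (fun row => d1 (List.take g0.length row)) gs).getD k []
        = d1 (List.take g0.length ((g0 :: gs).getD k [])) := by
    intro k hk
    cases k with
    | zero => simp
    | succ k' =>
        simp only [List.getD_cons_succ]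
        rw [List.getD_eq_getElem _ _ (by simp; omega), List.getElem_map,
          List.getD_eq_getElem _ _ (by omega)]
  unfold calculate_diff_dim2_alt mapform
  simp only [PySem.List.pyGet?_zero_cons, Option.getD_some, List.length_cons,
    List.map_cons, List.range_succ_eq_map, List.map_map]
  congr 1
  · rw [d1_take g0 g0.length le_rfl]
    refine List.map_congr_left fun j hj => ?_
    simp [hval, Gg]
  · rw [zip_tail_map]
    simp only [List.length_cons, List.length_map, Nat.add_sub_cancel]
    refine List.map_congr_left fun k hk => ?_
    have hk' : k < gs.length := by simpa using hk
    rw [hh k (by omega), hh (k+1) (by omega)]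
    simp only [Function.comp]
    rw [d1_take _ _ (hm k (by omega)), d1_take _ _ (hm (k+1) (by omega))]
    rw [List.zip_map', List.map_map]
    refine List.map_congr_left fun j hj => ?_
    simp [hval, Gg]

-- ===== VERDICT (by name: the statement is the Claim_ definition above) =====
theorem calculate_diff_dim2_spec : Claim_equal_calculate_diff_dim2 := by
  intro grid _ hpre
  unfold Spec_calculate_diff_dim2
  rw [A_eq_mapform, B_eq_mapform grid hpre]
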